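-- pv_equiv track=rewrite | github.com/981377660LMT/algorithm-study | 6_tree/前缀树trie/字典序搜索/字典序遍历.py | genLexicalOrder2
-- ===== SOURCE A (Python) =====
-- from collections import deque
-- from typing import Generator
--
-- def genLexicalOrder2(n: int) -> Generator[int, None, None]:
--     """字典序bfs遍历十叉树,生成[0,n]的整数"""
--
--     def bfs(start: int) -> Generator[int, None, None]:
--         queue = deque([start])
--         while queue:
--             nextQueue = deque()
--             step = len(queue)
--             for _ in range(step):
--                 cur = queue.popleft()
--                 for i in range(10):
--                     next = cur * 10 + i
--                     if next == 0:
--                         continue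
--                     if next > n:
--                         continue
--                     yield next
--                     nextQueue.append(next)
--             queue = nextQueue
--
--     yield 0
--     yield from bfs(0)
-- ===== SOURCE B (Python) =====
-- def genLexicalOrder2(n: int):
--     """字典序bfs遍历十叉树,生成[0,n]的整数 — direct form: the BFS emits 0 then 1..n ascending."""
--     yield 0
--     yield from range(1, n + 1)
-- ===== Notes on version B (the rewrite author's own statement) =====
-- stated objective: simpler
-- what changed: The level-by-level BFS over the 10-ary digit tree with two deques is replaced by directly yielding 0 followed by range(1, n+1), since the BFS emits exactly those values in that order.
import Mathlib
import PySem

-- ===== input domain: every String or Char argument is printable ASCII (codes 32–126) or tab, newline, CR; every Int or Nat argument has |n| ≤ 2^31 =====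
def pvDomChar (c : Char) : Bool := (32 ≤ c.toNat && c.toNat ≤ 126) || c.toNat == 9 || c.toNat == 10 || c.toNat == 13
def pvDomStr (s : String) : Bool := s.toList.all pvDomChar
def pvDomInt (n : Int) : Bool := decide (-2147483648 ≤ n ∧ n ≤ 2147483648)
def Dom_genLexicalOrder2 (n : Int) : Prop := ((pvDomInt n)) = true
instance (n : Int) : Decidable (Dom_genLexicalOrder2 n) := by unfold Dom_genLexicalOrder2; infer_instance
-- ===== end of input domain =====

-- B replaces A's two-deque level-by-level BFS over the 10-ary digit tree by directly
-- emitting 0 followed by range(1, n+1): simpler, same values in the same order.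

-- ===== PORT A =====
-- one body of A's inner `for i in range(10)` loop: both the yielded output (acc.1)
-- and nextQueue (acc.2) receive `next` under the same two `continue` guards
def pvStepA (n : Int) (acc : List Int × List Int) (cur : Int) : List Int × List Int :=
  (PySem.List.pyRange 0 10 1).foldl
    (fun acc i =>
      let next := cur * 10 + i
      if next = 0 then acc
      else if next > n then acc
      else (acc.1 ++ [next], acc.2 ++ [next]))
    acc

-- the `while queue:` loop of A's bfs; fuel only makes the loop total (it is never
-- exhausted: the queue empties after at most n.toNat + 1 levels)
def pvBfsA (n : Int) : Nat → List Int → List Int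
  | 0, _ => []
  | fuel + 1, queue =>
    if queue = [] then []
    else
      let p := queue.foldl (pvStepA n) ([], [])
      p.1 ++ pvBfsA n fuel p.2

def genLexicalOrder2 (n : Int) : List Int :=
  0 :: pvBfsA n (n.toNat + 2) [0]

-- ===== PORT B =====
def genLexicalOrder2_alt (n : Int) : List Int :=
  0 :: PySem.List.pyRange 1 (n + 1) 1

-- ===== PRECONDITION & SPEC =====
def Spec_genLexicalOrder2 (n : Int) (out : List Int) : Prop := out = genLexicalOrder2_alt n
instance (n : Int) (out : List Int) : Decidable (Spec_genLexicalOrder2 n out) := by unfold Spec_genLexicalOrder2; infer_instance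

-- ===== CLAIM (what is proved, stated in full; the proofs are below) =====
def Claim_equal_genLexicalOrder2 : Prop := ∀ (n : Int), Dom_genLexicalOrder2 n → Spec_genLexicalOrder2 n (genLexicalOrder2 n)

-- ===== LEMMAS AND PROOFS =====

-- `seg lo hi` = the integers lo, lo+1, …, hi (empty if hi < lo)
def seg (lo hi : Int) : List Int := (List.range (hi + 1 - lo).toNat).map (fun (j : Nat) => lo + (j : Int))

theorem seg_eq_pyRange (lo hi : Int) : seg lo hi = PySem.List.pyRange lo (hi + 1) 1 := by
  rw [PySem.List.pyRange_one]; rfl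

theorem seg_empty {lo hi : Int} (h : hi < lo) : seg lo hi = [] := by
  unfold seg
  have : (hi + 1 - lo).toNat = 0 := by omega
  simp [this]

theorem seg_cons {lo hi : Int} (h : lo ≤ hi) : seg lo hi = lo :: seg (lo + 1) hi := by
  unfold seg
  have h1 : (hi + 1 - lo).toNat = (hi + 1 - (lo + 1)).toNat + 1 := by omega
  rw [h1, List.range_succ_eq_map]
  simp only [List.map_cons, List.map_map]
  refine congrArg₂ List.cons (by simp) ?_
  apply List.map_congr_left; intro j _; simp [Function.comp]; omega

theorem seg_append {lo mid hi : Int} (h1 : lo ≤ mid + 1) (h2 : mid ≤ hi) :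
    seg lo mid ++ seg (mid + 1) hi = seg lo hi := by
  unfold seg
  have h3 : (hi + 1 - lo).toNat = (mid + 1 - lo).toNat + (hi + 1 - (mid + 1)).toNat := by omega
  rw [h3, List.range_add, List.map_append, List.map_map]
  congr 1
  apply List.map_congr_left
  intro j hj
  simp at hj ⊢
  omega

-- filter of a segment at an upper cut
theorem seg_filter_le (n : Int) : ∀ (k : Nat) (lo hi : Int), hi + 1 - lo = (k : Int) →
    (seg lo hi).filter (fun x => !decide (n < x)) = seg lo (min hi n) := by
  intro k
  induction k with
  | zero => intro lo hi hk; rw [seg_empty (by omega), seg_empty (by omega)]; rfl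
  | succ k ih =>
    intro lo hi hk
    rw [seg_cons (by omega), List.filter_cons]
    by_cases hn : n < lo
    · rw [if_neg (by simp [hn]), ih (lo+1) hi (by omega),
        seg_empty (by omega), seg_empty (by omega)]
    · rw [if_pos (by simp [hn]), ih (lo+1) hi (by omega)]
      by_cases h2 : lo ≤ min hi n
      · rw [seg_cons h2]
      · exfalso; omega

-- a total-function wrapper of seg_filter_le
theorem seg_filter_le' (n lo hi : Int) :
    (seg lo hi).filter (fun x => !decide (n < x)) = seg lo (min hi n) := by
  by_cases h : lo ≤ hi
  · exact seg_filter_le n (hi + 1 - lo).toNat lo hi (by omega)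
  · rw [seg_empty (by omega), seg_empty (by omega), List.filter_nil]

theorem mem_seg {x lo hi : Int} (h : x ∈ seg lo hi) : lo ≤ x ∧ x ≤ hi := by
  simp only [seg, List.mem_map, List.mem_range] at h
  obtain ⟨j, hj, rfl⟩ := h
  omega

theorem seg_ne_nil {lo hi : Int} (h : lo ≤ hi) : seg lo hi ≠ [] := by
  rw [seg_cons h]; simp

-- children emitted/queued for one cur (0 ≤ cur): the clipped decade
def childList (n cur : Int) : List Int := seg (max 1 (cur * 10)) (min (cur * 10 + 9) n)

theorem foldl_push (n cur : Int) : ∀ (L : List Int) (ys qs : List Int),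
    L.foldl
      (fun acc i =>
        let next := cur * 10 + i
        if next = 0 then acc
        else if next > n then acc
        else (acc.1 ++ [next], acc.2 ++ [next]))
      (ys, qs)
    = (ys ++ (L.map (fun i => cur * 10 + i)).filter (fun x => !decide (x = 0) && !decide (n < x)),
       qs ++ (L.map (fun i => cur * 10 + i)).filter (fun x => !decide (x = 0) && !decide (n < x))) := by
  intro L
  induction L with
  | nil => intro ys qs; simp
  | cons i L ih =>
    intro ys qs
    simp only [List.foldl_cons, List.map_cons, List.filter_cons]
    by_cases h0 : cur * 10 + i = 0
    · rw [if_pos h0, ih ys qs]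
      have hf : (!decide (cur * 10 + i = 0) && !decide (n < cur * 10 + i)) = false := by
        simp [h0]
      rw [hf]
      simp
    · by_cases h1 : cur * 10 + i > n
      · rw [if_neg h0, if_pos h1, ih ys qs]
        have hf : (!decide (cur * 10 + i = 0) && !decide (n < cur * 10 + i)) = false := by
          simp [h1]
        rw [hf]
        simp
      · rw [if_neg h0, if_neg h1, ih (ys ++ [cur * 10 + i]) (qs ++ [cur * 10 + i])]
        have hf : (!decide (cur * 10 + i = 0) && !decide (n < cur * 10 + i)) = true := by
          simp [h0]; omega
        rw [hf]
        simp

theorem seg_map_shift (c a b : Int) :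
    (seg a b).map (fun i => c + i) = seg (c + a) (c + b) := by
  unfold seg
  rw [List.map_map]
  have : (c + b + 1 - (c + a)) = (b + 1 - a) := by omega
  rw [this]
  apply List.map_congr_left; intro j _; simp [Function.comp]; omega

theorem pyRange_ten : PySem.List.pyRange 0 10 1 = seg 0 9 := by decide

theorem filter_seg_child (n a b : Int) (ha : 0 ≤ a) :
    (seg a b).filter (fun x => !decide (x = 0) && !decide (n < x)) = seg (max 1 a) (min b n) := by
  have key : ∀ lo hi : Int, 1 ≤ lo →
      (seg lo hi).filter (fun x => !decide (x = 0) && !decide (n < x)) = seg lo (min hi n) := by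
    intro lo hi hlo
    rw [← seg_filter_le' n lo hi]
    apply List.filter_congr
    intro x hx
    have := mem_seg hx
    simp [show x ≠ 0 by omega]
  by_cases h0 : a = 0
  · subst h0
    by_cases hb : 0 ≤ b
    · rw [seg_cons hb, List.filter_cons]
      rw [if_neg (by simp)]
      rw [show ((0:Int) + 1) = 1 by norm_num, key 1 b (by omega)]
      rw [show max 1 (0:Int) = 1 by omega]
    · rw [seg_empty (by omega), seg_empty (by omega), List.filter_nil]
  · have h1 : 1 ≤ a := by omega
    rw [key a b h1]
    have : max 1 a = a := by omega
    rw [this]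

theorem stepA_eq (n cur : Int) (hcur : 0 ≤ cur) (ys qs : List Int) :
    pvStepA n (ys, qs) cur = (ys ++ childList n cur, qs ++ childList n cur) := by
  unfold pvStepA childList
  rw [pyRange_ten, foldl_push, seg_map_shift]
  rw [show cur * 10 + 0 = cur * 10 by omega]
  rw [filter_seg_child n (cur * 10) (cur * 10 + 9) (by omega)]

theorem foldl_stepA (n : Int) : ∀ (Q : List Int) (ys qs : List Int), (∀ x ∈ Q, 0 ≤ x) →
    Q.foldl (pvStepA n) (ys, qs) =
      (ys ++ Q.flatMap (childList n), qs ++ Q.flatMap (childList n)) := by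
  intro Q
  induction Q with
  | nil => intro ys qs _; simp
  | cons c Q ih =>
    intro ys qs h
    simp only [List.foldl_cons, List.flatMap_cons]
    rw [stepA_eq n c (h c (by simp)) ys qs, ih _ _ (fun x hx => h x (by simp [hx]))]
    simp

theorem flatMap_childList_seg (n : Int) : ∀ (k : Nat) (lo hi : Int), hi + 1 - lo = (k : Int) →
    1 ≤ lo →
    (seg lo hi).flatMap (childList n) = seg (lo * 10) (min (hi * 10 + 9) n) := by
  intro k
  induction k with
  | zero =>
    intro lo hi hk hlo
    rw [seg_empty (by omega), List.flatMap_nil, seg_empty (by omega)]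
  | succ k ih =>
    intro lo hi hk hlo
    rw [seg_cons (by omega), List.flatMap_cons, ih (lo + 1) hi (by omega) (by omega)]
    unfold childList
    rw [show max 1 (lo * 10) = lo * 10 by omega]
    by_cases h : lo * 10 + 9 ≤ n
    · rw [show min (lo * 10 + 9) n = lo * 10 + 9 by omega]
      rw [show (lo + 1) * 10 = (lo * 10 + 9) + 1 by ring]
      exact seg_append (by omega) (by omega)
    · rw [show min (lo * 10 + 9) n = n by omega,
          show min (hi * 10 + 9) n = n by omega]
      rw [show seg ((lo + 1) * 10) n = [] from seg_empty (by omega), List.append_nil]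

theorem bfsA_seg (n : Int) : ∀ (fuel : Nat) (lo : Int), 1 ≤ lo → n < lo + fuel →
    pvBfsA n fuel (seg lo (min (lo * 10 - 1) n)) = seg (lo * 10) n := by
  intro fuel
  induction fuel with
  | zero =>
    intro lo hlo hn
    rw [pvBfsA, seg_empty (by omega)]
  | succ fuel ih =>
    intro lo hlo hn
    by_cases hq : lo ≤ n
    · rw [pvBfsA, if_neg (seg_ne_nil (by omega))]
      rw [foldl_stepA n _ [] [] (fun x hx => by have := mem_seg hx; omega)]
      rw [flatMap_childList_seg n (min (lo * 10 - 1) n + 1 - lo).toNat lo _ (by omega) hlo]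
      simp only [List.nil_append]
      have hmin : min ((min (lo * 10 - 1) n) * 10 + 9) n = min ((lo * 10) * 10 - 1) n := by
        by_cases h : lo * 10 - 1 ≤ n
        · rw [show min (lo * 10 - 1) n = lo * 10 - 1 by omega]; omega
        · rw [show min (lo * 10 - 1) n = n by omega]; omega
      rw [hmin, ih (lo * 10) (by omega) (by omega)]
      by_cases h : (lo * 10) * 10 - 1 ≤ n
      · have e := seg_append (lo := lo * 10) (mid := lo * 10 * 10 - 1) (hi := n)
          (by omega) (by omega)
        rw [show (lo * 10 * 10 - 1 + 1 : Int) = lo * 10 * 10 by omega] at e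
        rw [show min ((lo * 10) * 10 - 1) n = (lo * 10) * 10 - 1 by omega]
        exact e
      · rw [show min ((lo * 10) * 10 - 1) n = n by omega]
        rw [show seg (lo * 10 * 10) n = [] from seg_empty (by omega), List.append_nil]
    · rw [seg_empty (by omega), pvBfsA, if_pos rfl, seg_empty (by omega)]

theorem genLex_eq (n : Int) : genLexicalOrder2 n = 0 :: seg 1 n := by
  unfold genLexicalOrder2
  rw [pvBfsA, if_neg (by simp)]
  rw [show ([(0 : Int)].foldl (pvStepA n) ([], [])) = pvStepA n ([], []) 0 from rfl]
  rw [stepA_eq n 0 le_rfl [] []]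
  simp only [List.nil_append]
  rw [show childList n 0 = seg 1 (min (1 * 10 - 1) n) by
        unfold childList; norm_num]
  rw [bfsA_seg n (n.toNat + 1) 1 le_rfl (by omega)]
  by_cases h : 9 ≤ n
  · rw [show min (1 * 10 - 1 : Int) n = 9 by omega]
    rw [show (1 : Int) * 10 = 9 + 1 by norm_num]
    rw [seg_append (by omega) (by omega)]
  · rw [show min (1 * 10 - 1 : Int) n = n by omega]
    rw [show seg ((1 : Int) * 10) n = [] from seg_empty (by omega), List.append_nil]

-- ===== VERDICT (by name: the statement is the Claim_ definition above) =====
theorem genLexicalOrder2_spec : Claim_equal_genLexicalOrder2 := by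
  intro n _
  unfold Spec_genLexicalOrder2 genLexicalOrder2_alt
  rw [genLex_eq, seg_eq_pyRange]
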